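-- pv_equiv track=rewrite | github.com/sproutsai-engg/coding_question_generator | json_files/python_codes/Q_749.py | shortest_completing_word
-- ===== SOURCE A (Python) =====
-- def shortest_completing_word(license_plate, words):
--     target = [0] * 26
--     for c in license_plate:
--         if c.isalpha():
--             target[ord(c.lower()) - ord('a')] += 1
--
--     result = ""
--     for word in words:
--         current = [0] * 26
--         for c in word:
--             if c.isalpha():
--                 current[ord(c.lower()) - ord('a')] += 1
--
--         if all(a <= b for a, b in zip(target, current)) and (not result or len(word) < len(result)):
--             result = word
--
--     return result
-- ===== SOURCE B (Python) =====
-- def shortest_completing_word(license_plate, words):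
--     plate = [c.lower() for c in license_plate if c.isalpha()]
--     need = {}
--     for c in plate:
--         need[c] = need.get(c, 0) + 1
--     # stable sort: shortest first, ties keep original order; return the first cover
--     for word in sorted(words, key=len):
--         letters = [c.lower() for c in word if c.isalpha()]
--         if all(cnt <= letters.count(c) for c, cnt in need.items()):
--             return word
--     return ""
-- ===== Notes on version B (the rewrite author's own statement) =====
-- stated objective: alternative
-- what changed: Instead of A's single best-so-far scan comparing 26-entry count vectors, B extracts the plate's letters, builds a dict of per-letter needs once, stably sorts the words by length, and returns the first word whose per-letter occurrence counts cover the needs, short-circuiting at the first hit.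
-- intended difference: When the license plate contains no letters and words contains the empty string not in last position, A returns a later covering word (its falsy '' result gets overwritten by the next covering word) while B returns '', the genuinely shortest completing word, which is the intended value. — e.g. on shortest_completing_word("1", ["", "a"]): A returns "a", B returns ""
import Mathlib
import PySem

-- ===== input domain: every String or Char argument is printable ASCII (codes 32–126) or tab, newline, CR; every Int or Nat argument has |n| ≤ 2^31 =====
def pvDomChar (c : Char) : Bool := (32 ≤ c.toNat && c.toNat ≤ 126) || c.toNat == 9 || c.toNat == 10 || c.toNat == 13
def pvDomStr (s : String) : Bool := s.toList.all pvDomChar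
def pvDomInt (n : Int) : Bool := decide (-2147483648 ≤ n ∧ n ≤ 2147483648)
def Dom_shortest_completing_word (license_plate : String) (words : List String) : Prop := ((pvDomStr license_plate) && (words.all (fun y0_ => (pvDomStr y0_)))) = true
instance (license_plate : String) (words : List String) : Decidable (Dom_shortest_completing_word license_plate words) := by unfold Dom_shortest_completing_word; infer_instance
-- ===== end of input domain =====

-- B replaces A's best-so-far scan over 26-entry count vectors with a letter-multiset
-- extraction plus a dict of per-letter needs, checked shortest-first over a stable
-- length sort; on the D_ corner below A's falsy-"" accumulator loses the empty word and
-- B returns the intended "".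

-- ===== PORT A =====
-- letter histogram: target[ord(c.lower()) - ord('a')] += 1 for alphabetic c
-- (the index is always in [0, 26) when the branch is taken, so pyGetD/pySetD are exact)
def pvCountStepA (cnt : List Int) (ch : Char) : List Int :=
  if PySem.Chars.isalpha ch then
    PySem.List.pySetD cnt (((PySem.Chars.lowerChar ch).toNat : Int) - 97)
      (PySem.List.pyGetD cnt (((PySem.Chars.lowerChar ch).toNat : Int) - 97) 0 + 1)
  else cnt

def pvCountA (cs : List Char) : List Int := cs.foldl pvCountStepA (List.replicate 26 0)

-- all(a <= b for a, b in zip(target, current))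
def pvCoversA (t cur : List Int) : Bool := (t.zip cur).all (fun p => decide (p.1 ≤ p.2))

-- the body of A's 'for word in words' loop
def pvChooseA (target : List Int) (result word : String) : String :=
  if pvCoversA target (pvCountA word.toList) &&
      (result == "" || decide (PySem.Str.len word < PySem.Str.len result)) then word else result

def shortest_completing_word (license_plate : String) (words : List String) : String :=
  words.foldl (pvChooseA (pvCountA license_plate.toList)) ""

-- ===== PORT B =====
-- [c.lower() for c in s if c.isalpha()]
def pvLetters (s : String) : List Char :=
  s.toList.filterMap (fun c =>
    if PySem.Chars.isalpha c then some (PySem.Chars.lowerChar c) else none)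

-- need = {}; for c in plate: need[c] = need.get(c, 0) + 1
def pvNeed (plate : List Char) : PySem.Dict Char Int :=
  plate.foldl (fun d c => d.insert c (d.getD c 0 + 1)) PySem.Dict.empty

-- all(cnt <= letters.count(c) for c, cnt in need.items())
def pvCoversNeed (need : PySem.Dict Char Int) (letters : List Char) : Bool :=
  need.items.all (fun p => decide (p.2 ≤ (letters.count p.1 : Int)))

-- for word in sorted(words, key=len): return the first cover; else ""
def shortest_completing_word_alt (license_plate : String) (words : List String) : String :=
  match (PySem.List.sorted words PySem.Str.len).find?
      (fun w => pvCoversNeed (pvNeed (pvLetters license_plate)) (pvLetters w)) with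
  | some w => w
  | none => ""

-- ===== PRECONDITION & SPEC =====
-- When the license plate has no letters and words contains "" somewhere before the last position,
-- A returns a later covering word (its falsy "" accumulator is overwritten by the next covering
-- word) while B returns "", the genuinely shortest completing word, which is the intended value.
def D_shortest_completing_word (license_plate : String) (words : List String) : Prop :=
  license_plate.toList.all (fun ch => !PySem.Chars.isalpha ch) = true ∧
  "" ∈ words ∧ words.getLast? ≠ some ""
instance (license_plate : String) (words : List String) : Decidable (D_shortest_completing_word license_plate words) := by unfold D_shortest_completing_word; infer_instance

def Spec_shortest_completing_word (license_plate : String) (words : List String) (out : String) : Prop := ¬ D_shortest_completing_word license_plate words → out = shortest_completing_word_alt license_plate words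
instance (license_plate : String) (words : List String) (out : String) : Decidable (Spec_shortest_completing_word license_plate words out) := by unfold Spec_shortest_completing_word; infer_instance

def pvDiffWitness_shortest_completing_word : String × List String := ("1", ["", "a"])
def pvDiffWitnessOut_shortest_completing_word : String × String := ("a", "")

-- ===== CLAIM (what is proved, stated in full; the proofs are below) =====
def Claim_unchanged_shortest_completing_word : Prop := ∀ (license_plate : String) (words : List String), Dom_shortest_completing_word license_plate words → Spec_shortest_completing_word license_plate words (shortest_completing_word license_plate words)
def Claim_changed_shortest_completing_word : Prop := Dom_shortest_completing_word (pvDiffWitness_shortest_completing_word.1) (pvDiffWitness_shortest_completing_word.2) ∧ D_shortest_completing_word (pvDiffWitness_shortest_completing_word.1) (pvDiffWitness_shortest_completing_word.2) ∧ shortest_completing_word (pvDiffWitness_shortest_completing_word.1) (pvDiffWitness_shortest_completing_word.2) = pvDiffWitnessOut_shortest_completing_word.1 ∧ shortest_completing_word_alt (pvDiffWitness_shortest_completing_word.1) (pvDiffWitness_shortest_completing_word.2) = pvDiffWitnessOut_shortest_completing_word.2 ∧ pvDiffWitnessOut_shortest_completing_word.1 ≠ pvDiffWitnessOut_shortest_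completing_word.2
def Claim_exact_shortest_completing_word : Prop := ∀ (license_plate : String) (words : List String), Dom_shortest_completing_word license_plate words → D_shortest_completing_word license_plate words → shortest_completing_word license_plate words ≠ shortest_completing_word_alt license_plate words

-- ===== LEMMAS AND PROOFS =====

-- A's per-word test, as a named predicate used throughout the proof
def pvMatchA (t : List Int) (w : String) : Bool := pvCoversA t (pvCountA w.toList)

theorem pvCharLe (a b : Char) : a ≤ b ↔ a.toNat ≤ b.toNat := by
  rw [Char.le_def, UInt32.le_iff_toNat_le]; rfl

theorem pvCharEq_of_toNat {a b : Char} (h : a.toNat = b.toNat) : a = b :=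
  Char.ext (UInt32.toNat_inj.mp h)

theorem pvAlphaIff (c : Char) : PySem.Chars.isalpha c = true ↔
    (65 ≤ c.toNat ∧ c.toNat ≤ 90) ∨ (97 ≤ c.toNat ∧ c.toNat ≤ 122) := by
  have hA : ('A' : Char).toNat = 65 := rfl
  have hZ : ('Z' : Char).toNat = 90 := rfl
  have ha : ('a' : Char).toNat = 97 := rfl
  have hz : ('z' : Char).toNat = 122 := rfl
  simp [PySem.Chars.isalpha, PySem.Chars.isupper, PySem.Chars.islower, pvCharLe, hA, hZ, ha, hz]

theorem pvAlphaBounds (c : Char) (h : PySem.Chars.isalpha c = true) :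
    97 ≤ (PySem.Chars.lowerChar c).toNat ∧ (PySem.Chars.lowerChar c).toNat ≤ 122 := by
  rcases (pvAlphaIff c).mp h with ⟨h1, h2⟩ | ⟨h1, h2⟩
  · have hup : PySem.Chars.isupper c = true := by
      have hA : ('A' : Char).toNat = 65 := rfl
      have hZ : ('Z' : Char).toNat = 90 := rfl
      simp [PySem.Chars.isupper, pvCharLe, hA, hZ]; omega
    have hvalid : (c.toNat + 32).isValidChar := Or.inl (by omega)
    simp only [PySem.Chars.lowerChar, hup, if_true]
    rw [Char.toNat_ofNat, if_pos hvalid]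
    omega
  · have hup : PySem.Chars.isupper c = false := by
      have hA : ('A' : Char).toNat = 65 := rfl
      have hZ : ('Z' : Char).toNat = 90 := rfl
      simp [PySem.Chars.isupper, pvCharLe, hA, hZ]; omega
    simp only [PySem.Chars.lowerChar, hup, Bool.false_eq_true, if_false]
    omega

theorem pvLettersBounds (s : String) (c : Char) (hc : c ∈ pvLetters s) :
    97 ≤ c.toNat ∧ c.toNat ≤ 122 := by
  unfold pvLetters at hc
  rw [List.mem_filterMap] at hc
  obtain ⟨ch, _, hch⟩ := hc
  by_cases h : PySem.Chars.isalpha ch = true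
  · rw [if_pos h, Option.some_inj] at hch
    exact hch ▸ pvAlphaBounds ch h
  · rw [if_neg h] at hch; cases hch

theorem pvStep_alpha (cnt : List Int) (ch : Char) (h : PySem.Chars.isalpha ch = true)
    (hlen : cnt.length = 26) :
    pvCountStepA cnt ch = cnt.set ((PySem.Chars.lowerChar ch).toNat - 97)
      (cnt.getD ((PySem.Chars.lowerChar ch).toNat - 97) 0 + 1) := by
  obtain ⟨h1, h2⟩ := pvAlphaBounds ch h
  have h0 : (0:Int) ≤ ((PySem.Chars.lowerChar ch).toNat : Int) - 97 := by omega
  have hlt : ((PySem.Chars.lowerChar ch).toNat : Int) - 97 < (cnt.length : Int) := by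
    rw [hlen]; omega
  have htn : (((PySem.Chars.lowerChar ch).toNat : Int) - 97).toNat =
      (PySem.Chars.lowerChar ch).toNat - 97 := by omega
  have hjn : (PySem.Chars.lowerChar ch).toNat - 97 < cnt.length := by omega
  unfold pvCountStepA
  rw [if_pos h, PySem.List.pySetD_of_nonneg _ _ h0,
      PySem.List.pyGetD_eq_getElem cnt 0 h0 hlt]
  simp only [htn]
  congr 1
  rw [List.getD_eq_getElem?_getD, List.getElem?_eq_getElem hjn]
  rfl

theorem pvStep_noalpha (cnt : List Int) (ch : Char) (h : PySem.Chars.isalpha ch = false) :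
    pvCountStepA cnt ch = cnt := by
  unfold pvCountStepA; rw [h]; rfl

theorem pvRepl_nonneg : ∀ x ∈ List.replicate 26 (0:Int), 0 ≤ x := by
  intro x hx; rw [List.eq_of_mem_replicate hx]

theorem pvGetD_nonneg (l : List Int) (hn : ∀ x ∈ l, 0 ≤ x) (j : Nat) : 0 ≤ l.getD j 0 := by
  rw [List.getD_eq_getElem?_getD]
  rcases h : l[j]? with _ | x
  · simp
  · simp only [Option.getD_some]
    exact hn x (List.mem_of_getElem? h)

theorem pvCount_props : ∀ (cs : List Char) (init : List Int), init.length = 26 →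
    (∀ x ∈ init, 0 ≤ x) →
    (cs.foldl pvCountStepA init).length = 26 ∧
    (∀ x ∈ cs.foldl pvCountStepA init, 0 ≤ x) := by
  intro cs
  induction cs with
  | nil => intro init hlen hnn; exact ⟨hlen, hnn⟩
  | cons ch cs ih =>
    intro init hlen hnn
    simp only [List.foldl_cons]
    cases hca : PySem.Chars.isalpha ch with
    | false =>
      rw [pvStep_noalpha _ _ hca]
      exact ih init hlen hnn
    | true =>
      rw [pvStep_alpha _ _ hca hlen]
      set j0 : Nat := (PySem.Chars.lowerChar ch).toNat - 97 with hj0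
      set v : Int := init.getD j0 0 + 1 with hv
      have hlen' : (init.set j0 v).length = 26 := by rw [List.length_set]; exact hlen
      have hnn' : ∀ x ∈ init.set j0 v, 0 ≤ x := by
        intro x hx
        rcases List.mem_or_eq_of_mem_set hx with hx' | hx'
        · exact hnn x hx'
        · rw [hx', hv]
          have := pvGetD_nonneg init hnn j0
          omega
      exact ih _ hlen' hnn'

-- letters-of-a-char-list, the list-level form of pvLetters
def pvLettersL (cs : List Char) : List Char :=
  cs.filterMap (fun c =>
    if PySem.Chars.isalpha c then some (PySem.Chars.lowerChar c) else none)

theorem pvLetters_eq (s : String) : pvLetters s = pvLettersL s.toList := rfl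

-- the A-side counter at a letter's slot is exactly B's occurrence count of that letter
theorem pvCnt_getD : ∀ (cs : List Char) (init : List Int), init.length = 26 →
    ∀ (c : Char), 97 ≤ c.toNat → c.toNat ≤ 122 →
    (cs.foldl pvCountStepA init).getD (c.toNat - 97) 0 =
      init.getD (c.toNat - 97) 0 + ((pvLettersL cs).count c : Int) := by
  intro cs
  induction cs with
  | nil => intro init _ c _ _; simp [pvLettersL]
  | cons ch cs ih =>
    intro init hlen c h1 h2
    simp only [List.foldl_cons]
    cases hca : PySem.Chars.isalpha ch with
    | false =>
      rw [pvStep_noalpha _ _ hca]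
      have : pvLettersL (ch :: cs) = pvLettersL cs := by
        simp [pvLettersL, hca]
      rw [this]
      exact ih init hlen c h1 h2
    | true =>
      rw [pvStep_alpha _ _ hca hlen]
      obtain ⟨hb1, hb2⟩ := pvAlphaBounds ch hca
      set lc := PySem.Chars.lowerChar ch with hlc
      set j0 : Nat := lc.toNat - 97 with hj0
      set v : Int := init.getD j0 0 + 1 with hv
      have hlen' : (init.set j0 v).length = 26 := by rw [List.length_set]; exact hlen
      have hLl : pvLettersL (ch :: cs) = lc :: pvLettersL cs := by
        rw [hlc]; simp [pvLettersL, hca]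
      rw [hLl, ih _ hlen' c h1 h2]
      by_cases hcc : lc = c
      · have hje : j0 = c.toNat - 97 := by rw [← hcc]
        rw [List.getD_eq_getElem?_getD (l := init.set j0 v), ← hje,
            List.getElem?_set_self (by omega), Option.getD_some, hv]
        rw [List.count_cons, if_pos (by simp [hcc])]
        rw [show init.getD j0 0 = init.getD (c.toNat - 97) 0 from by rw [hje]]
        push_cast
        omega
      · have hje : j0 ≠ c.toNat - 97 := by
          intro he
          apply hcc
          apply pvCharEq_of_toNat
          omega
        have hbe : (lc == c) = false := by simpa using hcc
        rw [List.getD_eq_getElem?_getD (l := init.set j0 v), List.getElem?_set,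
            if_neg hje, ← List.getD_eq_getElem?_getD, List.count_cons, hbe]
        simp

theorem pvGetD_zero (j : Nat) : (List.replicate 26 (0:Int)).getD j 0 = 0 := by
  rw [List.getD_eq_getElem?_getD]
  rcases h : (List.replicate 26 (0:Int))[j]? with _ | x
  · simp
  · simp [List.eq_of_mem_replicate (List.mem_of_getElem? h)]

theorem pvCountA_getD' (cs : List Char) (c : Char) (h1 : 97 ≤ c.toNat) (h2 : c.toNat ≤ 122) :
    (pvCountA cs).getD (c.toNat - 97) 0 = ((pvLettersL cs).count c : Int) := by
  unfold pvCountA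
  rw [pvCnt_getD cs _ (by simp) c h1 h2, pvGetD_zero]
  ring

theorem pvCountA_getD (s : String) (c : Char) (h1 : 97 ≤ c.toNat) (h2 : c.toNat ≤ 122) :
    (pvCountA s.toList).getD (c.toNat - 97) 0 = ((pvLetters s).count c : Int) := by
  rw [pvCountA_getD' s.toList c h1 h2, pvLetters_eq]

theorem pvCoversA_iff (t cur : List Int) (ht : t.length = 26) (hc : cur.length = 26) :
    pvCoversA t cur = true ↔ ∀ j < 26, t.getD j 0 ≤ cur.getD j 0 := by
  unfold pvCoversA
  rw [List.all_eq_true]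
  constructor
  · intro h j hj
    have hjz : j < (t.zip cur).length := by rw [List.length_zip, ht, hc]; omega
    have := h _ (List.getElem_mem hjz)
    rw [List.getElem_zip] at this
    simp only [decide_eq_true_eq] at this
    rw [List.getD_eq_getElem?_getD, List.getElem?_eq_getElem (by omega),
        List.getD_eq_getElem?_getD, List.getElem?_eq_getElem (by omega)]
    exact this
  · rintro h ⟨a, b⟩ hp
    obtain ⟨j, hjz, hje⟩ := List.getElem_of_mem hp
    rw [List.getElem_zip] at hje
    have hj26 : j < 26 := by rw [List.length_zip, ht, hc] at hjz; omega
    have := h j hj26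
    rw [List.getD_eq_getElem?_getD, List.getElem?_eq_getElem (by omega),
        List.getD_eq_getElem?_getD, List.getElem?_eq_getElem (by omega)] at this
    simp only [Option.getD_some] at this
    obtain ⟨ha, hb⟩ := Prod.mk.inj hje
    subst ha; subst hb
    simpa using this

-- the dict of needs is the counter of the plate letters, itemised over the distinct letters
theorem pvCoversNeed_eq (plate letters : List Char) :
    pvCoversNeed (pvNeed plate) letters =
      plate.all (fun c => decide (plate.count c ≤ letters.count c)) := by
  unfold pvCoversNeed pvNeed
  rw [PySem.Dict.foldl_insert_getD_add_one_eq_counter, PySem.Dict.items_counter, List.all_map]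
  rw [Bool.eq_iff_iff, List.all_eq_true, List.all_eq_true]
  constructor
  · intro h c hc
    have := h c ((PySem.Set.mem_ofList plate c).mpr hc)
    simp only [Function.comp_apply, decide_eq_true_eq] at this ⊢
    exact_mod_cast this
  · intro h c hc
    have := h c ((PySem.Set.mem_ofList plate c).mp hc)
    simp only [Function.comp_apply, decide_eq_true_eq] at this ⊢
    exact_mod_cast this

-- the bridge: B's per-letter-needs coverage test equals A's 26-vector test
theorem pvMatch_bridge (lp w : String) :
    pvCoversNeed (pvNeed (pvLetters lp)) (pvLetters w) = pvMatchA (pvCountA lp.toList) w := by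
  rw [pvCoversNeed_eq]
  have hlt : (pvCountA lp.toList).length = 26 :=
    (pvCount_props lp.toList _ (by simp) pvRepl_nonneg).1
  have hlc : (pvCountA w.toList).length = 26 :=
    (pvCount_props w.toList _ (by simp) pvRepl_nonneg).1
  unfold pvMatchA
  rcases hB : (pvLetters lp).all (fun c => decide ((pvLetters lp).count c ≤ (pvLetters w).count c)) with _ | _
  · rw [List.all_eq_false] at hB
    obtain ⟨c, hcm, hcf⟩ := hB
    obtain ⟨h1, h2⟩ := pvLettersBounds lp c hcm
    have hcnt : ¬ ((pvLetters lp).count c ≤ (pvLetters w).count c) := by simpa using hcf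
    symm
    rw [Bool.eq_false_iff]
    intro hcov
    have := (pvCoversA_iff _ _ hlt hlc).mp hcov (c.toNat - 97) (by omega)
    rw [pvCountA_getD lp c h1 h2, pvCountA_getD w c h1 h2] at this
    exact hcnt (by exact_mod_cast this)
  · rw [List.all_eq_true] at hB
    symm
    rw [pvCoversA_iff _ _ hlt hlc]
    intro j hj
    set c : Char := Char.ofNat (97 + j) with hcdef
    have hvalid : (97 + j).isValidChar := Or.inl (by omega)
    have hcn : c.toNat = 97 + j := by rw [hcdef, Char.toNat_ofNat, if_pos hvalid]
    have hje : j = c.toNat - 97 := by omega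
    rw [hje, pvCountA_getD lp c (by omega) (by omega), pvCountA_getD w c (by omega) (by omega)]
    by_cases hmem : c ∈ pvLetters lp
    · have := hB c hmem
      simp only [decide_eq_true_eq] at this
      exact_mod_cast this
    · rw [List.count_eq_zero.mpr hmem]
      positivity

-- unfold B's port to the pvMatchA predicate
theorem pvAltEq (lp : String) (ws : List String) :
    shortest_completing_word_alt lp ws =
      match (PySem.List.sorted ws PySem.Str.len).find? (pvMatchA (pvCountA lp.toList)) with
      | some w => w
      | none => "" := by
  unfold shortest_completing_word_alt
  rw [show (fun w => pvCoversNeed (pvNeed (pvLetters lp)) (pvLetters w)) = pvMatchA (pvCountA lp.toList)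
    from funext (pvMatch_bridge lp)]

theorem pvCount_noalpha (cs : List Char) (h : cs.all (fun ch => !PySem.Chars.isalpha ch) = true) :
    pvCountA cs = List.replicate 26 0 := by
  unfold pvCountA
  rw [List.all_eq_true] at h
  induction cs with
  | nil => rfl
  | cons ch cs ih =>
    rw [List.foldl_cons, pvStep_noalpha _ _ (by simpa using h ch (by simp))]
    exact ih (fun x hx => h x (by simp [hx]))

theorem pvCovers_zero_left (cur : List Int) (hnn : ∀ x ∈ cur, 0 ≤ x) :
    pvCoversA (List.replicate 26 0) cur = true := by
  unfold pvCoversA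
  rw [List.all_eq_true]
  rintro ⟨a, b⟩ hp
  obtain ⟨ha, hb⟩ := List.of_mem_zip hp
  have := List.eq_of_mem_replicate ha
  subst this
  simpa using hnn b hb

theorem pvCount_pos_of_alpha (cs : List Char) (ch : Char) (hmem : ch ∈ cs)
    (h : PySem.Chars.isalpha ch = true) :
    1 ≤ (pvCountA cs).getD ((PySem.Chars.lowerChar ch).toNat - 97) 0 := by
  obtain ⟨hb1, hb2⟩ := pvAlphaBounds ch h
  rw [pvCountA_getD' cs (PySem.Chars.lowerChar ch) hb1 hb2]
  have hlm : PySem.Chars.lowerChar ch ∈ pvLettersL cs := by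
    unfold pvLettersL
    rw [List.mem_filterMap]
    exact ⟨ch, hmem, by rw [if_pos h]⟩
  have := List.count_pos_iff.mpr hlm
  omega

theorem pvCovers_zero_right_false (t : List Int) (hlen : t.length = 26) (j : Nat) (hj : j < 26)
    (hpos : 1 ≤ t.getD j 0) : pvCoversA t (List.replicate 26 0) = false := by
  unfold pvCoversA
  rw [Bool.eq_false_iff]
  intro hall
  rw [List.all_eq_true] at hall
  have hjz : j < (t.zip (List.replicate 26 (0:Int))).length := by
    rw [List.length_zip, List.length_replicate, hlen]; omega
  have hmem := List.getElem_mem hjz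
  have hval := hall _ hmem
  rw [List.getElem_zip] at hval
  simp only [List.getElem_replicate, decide_eq_true_eq] at hval
  rw [List.getD_eq_getElem?_getD, List.getElem?_eq_getElem (by omega)] at hpos
  simp only [Option.getD_some] at hpos
  omega

theorem pvLen_zero_iff (w : String) : PySem.Str.len w = 0 ↔ w = "" := by
  rw [PySem.Str.len_eq]
  constructor
  · intro h
    have : w.toList.length = 0 := by exact_mod_cast h
    exact String.toList_eq_nil_iff.mp (List.length_eq_zero_iff.mp this)
  · intro h; subst h; rfl

theorem pvLen_nonneg (w : String) : 0 ≤ PySem.Str.len w := by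
  rw [PySem.Str.len_eq]; positivity

theorem pvInsertBy_cons {α : Type} (bf : α → α → Bool) (w y : α) (ys : List α) :
    PySem.List.insertBy bf w (y :: ys) =
      if bf w y then w :: y :: ys else y :: PySem.List.insertBy bf w ys := rfl

theorem pvFind_insertBy_neg {α : Type} (p : α → Bool) (bf : α → α → Bool) (w : α) (l : List α)
    (h : p w = false) :
    (PySem.List.insertBy bf w l).find? p = l.find? p := by
  induction l with
  | nil => simp [PySem.List.insertBy, List.find?, h]
  | cons y ys ih =>
    rw [pvInsertBy_cons]
    by_cases hb : bf w y
    · rw [if_pos hb]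
      simp [List.find?_cons, h]
    · rw [if_neg hb]
      cases hy : p y <;> simp [hy, ih]

theorem pvFind_insertBy_pos {α κ : Type} [LinearOrder κ] (key : α → κ) (p : α → Bool) (w : α)
    (l : List α) (hp : p w = true) (hl : l.Pairwise (fun a b => key a ≤ key b)) :
    (PySem.List.insertBy (fun a b => decide (key a < key b)) w l).find? p =
      match l.find? p with
      | none => some w
      | some r => if key w < key r then some w else some r := by
  induction l with
  | nil => simp [PySem.List.insertBy, List.find?, hp]
  | cons y ys ih =>
    rw [List.pairwise_cons] at hl
    obtain ⟨hy, htl⟩ := hl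
    rw [pvInsertBy_cons]
    by_cases hlt : key w < key y
    · rw [if_pos (by simpa using hlt)]
      cases hfy : p y with
      | true =>
        simp only [List.find?_cons, hp, hfy]
        rw [if_pos hlt]
      | false =>
        cases hfys : ys.find? p with
        | none => simp [hp, hfy, hfys]
        | some r =>
          have hr := List.mem_of_find?_eq_some hfys
          simp only [List.find?_cons, hp, hfy, hfys]
          rw [if_pos (lt_of_lt_of_le hlt (hy r hr))]
    · rw [if_neg (by simpa using hlt)]
      cases hfy : p y with
      | true =>
        simp only [List.find?_cons, hfy]
        rw [if_neg hlt]
      | false =>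
        simp only [List.find?_cons, hfy]
        exact ih htl

theorem pvSorted_append (ws : List String) (w : String) :
    PySem.List.sorted (ws ++ [w]) PySem.Str.len =
      PySem.List.insertBy (fun a b => decide (PySem.Str.len a < PySem.Str.len b)) w
        (PySem.List.sorted ws PySem.Str.len) := by
  rw [PySem.List.sorted_eq_foldl_insertBy, PySem.List.sorted_eq_foldl_insertBy, List.foldl_append]
  rfl

theorem pvChooseA_eq (t : List Int) (r w : String) :
    pvChooseA t r w =
      if pvMatchA t w && (r == "" || decide (PySem.Str.len w < PySem.Str.len r))
      then w else r := rfl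

theorem pvInv (t : List Int) (ws : List String)
    (hws : ∀ w ∈ ws, pvMatchA t w = true → w ≠ "") :
    (ws.foldl (pvChooseA t) "" = "" ∧ (PySem.List.sorted ws PySem.Str.len).find? (pvMatchA t) = none) ∨
    (ws.foldl (pvChooseA t) "" ≠ "" ∧
      (PySem.List.sorted ws PySem.Str.len).find? (pvMatchA t) = some (ws.foldl (pvChooseA t) "")) := by
  induction ws using List.reverseRecOn with
  | nil => exact Or.inl ⟨rfl, rfl⟩
  | append_singleton ws w ih =>
    have hws' : ∀ v ∈ ws, pvMatchA t v = true → v ≠ "" :=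
      fun v hv => hws v (List.mem_append.mpr (Or.inl hv))
    have hwlast : pvMatchA t w = true → w ≠ "" :=
      hws w (List.mem_append.mpr (Or.inr (by simp)))
    rw [List.foldl_append, List.foldl_cons, List.foldl_nil, pvSorted_append]
    set r := ws.foldl (pvChooseA t) "" with hrdef
    by_cases hp : pvMatchA t w = true
    · rcases ih hws' with ⟨hr, hf⟩ | ⟨hr, hf⟩
      · have hfind : (PySem.List.insertBy (fun a b => decide (PySem.Str.len a < PySem.Str.len b))
            w (PySem.List.sorted ws PySem.Str.len)).find? (pvMatchA t) = some w := by
          rw [pvFind_insertBy_pos PySem.Str.len (pvMatchA t) w _ hp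
            (PySem.List.sorted_pairwise ws PySem.Str.len), hf]
        rw [hfind]
        have hcw : pvChooseA t r w = w := by
          rw [pvChooseA_eq, hp, hr]
          simp
        rw [hcw]
        exact Or.inr ⟨hwlast hp, rfl⟩
      · have hfind : (PySem.List.insertBy (fun a b => decide (PySem.Str.len a < PySem.Str.len b))
            w (PySem.List.sorted ws PySem.Str.len)).find? (pvMatchA t) =
            if PySem.Str.len w < PySem.Str.len r then some w else some r := by
          rw [pvFind_insertBy_pos PySem.Str.len (pvMatchA t) w _ hp
            (PySem.List.sorted_pairwise ws PySem.Str.len), hf]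
        rw [hfind]
        have hrne : (r == "") = false := by simp [hr]
        by_cases hlt : PySem.Str.len w < PySem.Str.len r
        · have hcw : pvChooseA t r w = w := by
            rw [pvChooseA_eq, hp, hrne, decide_eq_true hlt]
            simp
          rw [hcw, if_pos hlt]
          exact Or.inr ⟨hwlast hp, rfl⟩
        · have hcw : pvChooseA t r w = r := by
            rw [pvChooseA_eq, hp, hrne, decide_eq_false hlt]
            simp
          rw [hcw, if_neg hlt]
          exact Or.inr ⟨hr, rfl⟩
    · have hpf : pvMatchA t w = false := by simpa using hp
      rw [pvFind_insertBy_neg _ _ _ _ hpf]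
      have hcw : pvChooseA t r w = r := by
        rw [pvChooseA_eq, hpf]
        simp
      rw [hcw]
      exact ih hws'

theorem pvCount_empty : pvCountA ("" : String).toList = List.replicate 26 0 := by
  rw [String.toList_empty]; rfl

theorem pvAlt_empty (lp : String) (ws : List String)
    (ht : pvCountA lp.toList = List.replicate 26 0) (hin : "" ∈ ws) :
    shortest_completing_word_alt lp ws = "" := by
  have hne : ws ≠ [] := by rintro rfl; simp at hin
  rw [pvAltEq]
  cases hS : PySem.List.sorted ws PySem.Str.len with
  | nil => exact absurd ((PySem.List.sorted_eq_nil_iff ws _ false).mp hS) hne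
  | cons m tl =>
    have hm0 := PySem.List.key_head_sorted_le ws PySem.Str.len hS "" hin
    have hm : m = "" := by
      apply (pvLen_zero_iff m).mp
      have h0 : PySem.Str.len ("" : String) = 0 := rfl
      have := pvLen_nonneg m
      omega
    subst hm
    have hcov : pvMatchA (pvCountA lp.toList) "" = true := by
      unfold pvMatchA
      rw [ht, pvCount_empty]
      exact pvCovers_zero_left _ pvRepl_nonneg
    simp [hcov]

theorem pvFold_last_ne (t : List Int) (ws : List String) (hne : ws ≠ [])
    (hlast : ws.getLast hne ≠ "")
    (hcov : pvMatchA t (ws.getLast hne) = true) :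
    ws.foldl (pvChooseA t) "" ≠ "" := by
  conv_lhs => rw [← List.dropLast_append_getLast hne]
  rw [List.foldl_append, List.foldl_cons, List.foldl_nil]
  set r := ws.dropLast.foldl (pvChooseA t) "" with hrdef
  rw [pvChooseA_eq, hcov]
  by_cases hc : (r == "" || decide (PySem.Str.len (ws.getLast hne) < PySem.Str.len r)) = true
  · rw [hc]; simpa using hlast
  · simp only [Bool.true_and]
    rw [Bool.not_eq_true] at hc
    rw [hc]
    simp only [Bool.false_eq_true, if_false]
    intro hre
    rw [hre] at hc
    simp at hc

theorem pvMain_core (lp : String) (ws : List String)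
    (hws : ∀ w ∈ ws, pvMatchA (pvCountA lp.toList) w = true → w ≠ "") :
    shortest_completing_word lp ws = shortest_completing_word_alt lp ws := by
  show ws.foldl (pvChooseA (pvCountA lp.toList)) "" = _
  rw [pvAltEq]
  rcases pvInv (pvCountA lp.toList) ws hws with ⟨hr, hf⟩ | ⟨hr, hf⟩
  · rw [hf, hr]
  · rw [hf]

-- ===== VERDICT (by name: the statement is the Claim_ definition above) =====
theorem shortest_completing_word_spec : Claim_unchanged_shortest_completing_word := by
  intro lp ws _ hND
  by_cases halpha : lp.toList.all (fun ch => !PySem.Chars.isalpha ch) = true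
  · have ht : pvCountA lp.toList = List.replicate 26 0 := pvCount_noalpha _ halpha
    by_cases hin : ("" : String) ∈ ws
    · have hlast : ws.getLast? = some "" := by
        by_contra hc
        exact hND ⟨halpha, hin, hc⟩
      have hne : ws ≠ [] := by rintro rfl; simp at hin
      have hg : ws.getLast hne = "" := by
        have := List.getLast?_eq_some_getLast hne
        rw [this] at hlast
        exact Option.some_injective _ hlast
      have hAe : ws.foldl (pvChooseA (pvCountA lp.toList)) "" = "" := by
        conv_lhs => rw [← List.dropLast_append_getLast hne]
        rw [List.foldl_append, List.foldl_cons, List.foldl_nil, hg]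
        set r := ws.dropLast.foldl (pvChooseA (pvCountA lp.toList)) "" with hrdef
        have hcov : pvMatchA (pvCountA lp.toList) "" = true := by
          unfold pvMatchA
          rw [ht, pvCount_empty]
          exact pvCovers_zero_left _ pvRepl_nonneg
        rw [pvChooseA_eq, hcov]
        by_cases hre : r = ""
        · simp [hre]
        · simp [hre]
      show ws.foldl (pvChooseA (pvCountA lp.toList)) "" = _
      rw [hAe, pvAlt_empty lp ws ht hin]
    · exact pvMain_core lp ws (fun w hw _ he => hin (he ▸ hw))
  · have hex : ∃ ch ∈ lp.toList, PySem.Chars.isalpha ch = true := by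
      by_contra hc
      rw [not_exists] at hc
      apply halpha
      rw [List.all_eq_true]
      intro x hx
      simpa [hx] using hc x
    obtain ⟨ch, hchm, hch⟩ := hex
    have hb := pvAlphaBounds ch hch
    have hpe : pvMatchA (pvCountA lp.toList) "" = false := by
      unfold pvMatchA
      rw [pvCount_empty]
      exact pvCovers_zero_right_false _
        (pvCount_props lp.toList _ (by simp) pvRepl_nonneg).1
        ((PySem.Chars.lowerChar ch).toNat - 97) (by omega)
        (pvCount_pos_of_alpha lp.toList ch hchm hch)
    exact pvMain_core lp ws (fun w _ hpw he => by rw [he, hpe] at hpw; exact absurd hpw (by simp))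

theorem shortest_completing_word_changed : Claim_changed_shortest_completing_word := by
  unfold Claim_changed_shortest_completing_word; decide

theorem shortest_completing_word_tight : Claim_exact_shortest_completing_word := by
  intro lp ws _ hD
  obtain ⟨halpha, hin, hlast⟩ := hD
  have ht : pvCountA lp.toList = List.replicate 26 0 := pvCount_noalpha _ halpha
  have hne : ws ≠ [] := by rintro rfl; simp at hin
  have hgne : ws.getLast hne ≠ "" := by
    intro he
    apply hlast
    rw [List.getLast?_eq_some_getLast hne, he]
  have hcov : pvMatchA (pvCountA lp.toList) (ws.getLast hne) = true := by
    unfold pvMatchA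
    rw [ht]
    exact pvCovers_zero_left _
      (pvCount_props (ws.getLast hne).toList _ (by simp) pvRepl_nonneg).2
  have hA := pvFold_last_ne (pvCountA lp.toList) ws hne hgne hcov
  rw [pvAlt_empty lp ws ht hin]
  exact hA
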